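-- pv_equiv track=rewrite | github.com/jmartinezfarciert/computing-talent-initiative-interview-problem-solving | m03_lists/wave_array.py | wave_array
-- ===== SOURCE A (Python) =====
-- def wave_array(integers):
--     num_integers = len(integers)
--     wave_array = []
--     while len(integers) > 1:
--         wave_array.append(integers.pop((len(wave_array)+1)%2 ))
--     wave_array.append(integers.pop())
--     integers[:] = wave_array[:]
--
--     return integers
-- ===== SOURCE B (Python) =====
-- def wave_array(integers):
--     # Single O(n) pass with a one-element buffer (A repeatedly pops from the
--     # front of the list, which is quadratic). Same in-place mutation as A.
--     result = []
--     pending = None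
--     for x in integers:
--         if pending is None:
--             pending = x
--         else:
--             result.append(x)
--             result.append(pending)
--             pending = None
--     if pending is not None:
--         result.append(pending)
--     integers[:] = result
--     return integers
-- ===== Notes on version B (the rewrite author's own statement) =====
-- stated objective: faster
-- what changed: replaces the pop-from-the-front-of-the-shrinking-list loop (each pop(0)/pop(1) shifts the whole tail) with one forward pass that buffers every other element and emits swapped pairs
import Mathlib
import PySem

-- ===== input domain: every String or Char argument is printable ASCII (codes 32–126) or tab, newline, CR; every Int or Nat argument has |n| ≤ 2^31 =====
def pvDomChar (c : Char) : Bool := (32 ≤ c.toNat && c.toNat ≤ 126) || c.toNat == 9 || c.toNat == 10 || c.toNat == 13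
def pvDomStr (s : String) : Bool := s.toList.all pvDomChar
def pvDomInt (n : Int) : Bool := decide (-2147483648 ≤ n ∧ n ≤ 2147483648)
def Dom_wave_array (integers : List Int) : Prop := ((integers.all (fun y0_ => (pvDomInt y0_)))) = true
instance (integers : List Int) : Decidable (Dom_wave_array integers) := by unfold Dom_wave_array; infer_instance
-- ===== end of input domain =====

-- B replaces A's quadratic pop-from-front loop by one forward pass buffering every
-- other element (objective: faster, asymptotic). Both mutate `integers` in place the
-- same way; the equivalence proved here is about the return value.


-- ===== PORT A =====
-- while len(integers) > 1: wave.append(integers.pop((len(wave)+1)%2)); then wave.append(integers.pop())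
-- (the `none` branches are unreachable: inside the loop the index is 0 or 1 with length ≥ 2;
--  the final pop() returns none only on the empty input, which Pre_ excludes)
def waveLoopA (integers wave : List Int) : List Int :=
  if integers.length > 1 then
    match h : PySem.List.pop? integers (((wave.length : Int) + 1) % 2) with
    | some (x, rest) => waveLoopA rest (wave ++ [x])
    | none => wave
  else
    match PySem.List.pop? integers (-1) with
    | some (x, _) => wave ++ [x]
    | none => wave
termination_by integers.length
decreasing_by
  have := PySem.List.length_of_pop?_eq_some _ h; simp at this; omega

def wave_array (integers : List Int) : List Int :=
  waveLoopA integers []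

-- ===== PORT B =====
-- loop body of Source B: state = (result, pending)
def waveStep (st : List Int × Option Int) (x : Int) : List Int × Option Int :=
  match st.2 with
  | none => (st.1, some x)
  | some p => (st.1 ++ [x, p], none)

def wave_array_alt (integers : List Int) : List Int :=
  let st := integers.foldl waveStep ([], none)
  match st.2 with
  | some p => st.1 ++ [p]
  | none => st.1

-- ===== PRECONDITION & SPEC =====
-- Pre_ excludes only the empty list, on which A's final unconditional pop() raises IndexError.
def Pre_wave_array (integers : List Int) : Prop := integers ≠ []
instance (integers : List Int) : Decidable (Pre_wave_array integers) := by unfold Pre_wave_array; infer_instance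
def pvWitness_wave_array : List Int := ([1, 2, 3, 4, 5])

def Spec_wave_array (integers : List Int) (out : List Int) : Prop := out = wave_array_alt integers
instance (integers : List Int) (out : List Int) : Decidable (Spec_wave_array integers out) := by unfold Spec_wave_array; infer_instance

-- ===== CLAIM (what is proved, stated in full; the proofs are below) =====
def Claim_equal_wave_array : Prop := ∀ (integers : List Int), Dom_wave_array integers → Pre_wave_array integers → Spec_wave_array integers (wave_array integers)

-- ===== LEMMAS AND PROOFS =====
-- the common specification: swap adjacent pairs
def swapPairs : List Int → List Int
  | a :: b :: rest => b :: a :: swapPairs rest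
  | xs => xs

lemma waveLoopA_eq (integers wave : List Int) (h : wave.length % 2 = 0) :
    waveLoopA integers wave = wave ++ swapPairs integers := by
  induction integers using swapPairs.induct generalizing wave with
  | case1 a b rest ih =>
    have hidx : (((wave.length : Int) + 1) % 2) = 1 := by omega
    have hp1 : PySem.List.pop? (a :: b :: rest) 1 = some (b, a :: rest) := by
      simpa using PySem.List.pop?_natCast (a :: b :: rest) 1 (by simp)
    rw [waveLoopA.eq_def, if_pos (by simp)]
    split
    case h_2 heq => rw [hidx, hp1] at heq; cases heq
    case h_1 x rest1 heq =>
      rw [hidx, hp1] at heq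
      injection heq with heq'
      cases heq'
      -- second iteration: index (len(wave)+1+1)%2 = 0, pop the head
      rcases rest with _ | ⟨c, rest'⟩
      · -- remaining list is [a]: loop exits, final pop() takes a
        rw [waveLoopA.eq_def, if_neg (by simp)]
        simp [PySem.List.pop?, PySem.List.pyIdx?, swapPairs]
      · have hidx0 : ((((wave ++ [b]).length : Int) + 1) % 2) = 0 := by
          simp; omega
        rw [waveLoopA.eq_def, if_pos (by simp)]
        split
        case h_2 heq2 =>
          rw [hidx0, PySem.List.pop?_zero_cons] at heq2; cases heq2
        case h_1 y rest2 heq2 =>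
          rw [hidx0, PySem.List.pop?_zero_cons] at heq2
          injection heq2 with heq2'
          cases heq2'
          rw [ih (wave ++ [b] ++ [a]) (by simp; omega)]
          simp [swapPairs]
  | case2 xs hne =>
    rcases xs with _ | ⟨x, _ | _⟩
    · rw [waveLoopA.eq_def]
      simp [PySem.List.pop?, PySem.List.pyIdx?, swapPairs]
    · rw [waveLoopA.eq_def]
      simp [PySem.List.pop?, PySem.List.pyIdx?, swapPairs]
    · exact absurd rfl (hne _ _ _)

lemma waveFold_eq (integers res : List Int) :
    (match (integers.foldl waveStep (res, none)).2 with
      | some p => (integers.foldl waveStep (res, none)).1 ++ [p]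
      | none => (integers.foldl waveStep (res, none)).1) = res ++ swapPairs integers := by
  induction integers using swapPairs.induct generalizing res with
  | case1 a b rest ih =>
    simp only [List.foldl_cons, waveStep]
    rw [ih (res ++ [b, a])]
    simp [swapPairs]
  | case2 xs hne =>
    rcases xs with _ | ⟨x, _ | _⟩
    · simp [swapPairs]
    · simp [waveStep, swapPairs]
    · exact absurd rfl (hne _ _ _)

-- ===== VERDICT (by name: the statement is the Claim_ definition above) =====
theorem wave_array_spec : Claim_equal_wave_array := by
  intro integers _ _
  unfold Spec_wave_array wave_array wave_array_alt
  rw [waveLoopA_eq integers [] (by simp)]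
  have := waveFold_eq integers []
  simp only [List.nil_append] at this ⊢
  exact this.symm
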